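-- pv_equiv track=rewrite | github.com/981377660LMT/algorithm-study | leetcode/0/a.py | minimize_max_diff
-- ===== SOURCE A (Python) =====
-- from math import ceil
--
-- def minimize_max_diff(nums):
--     n = len(nums)
--     max_adjacent_known_diff = 0
--     min_adjacent = None
--     max_adjacent = None
--     prev_known_index = None
--     segments = []
--
--     # Step 1: Identify known elements and calculate max_adjacent_known_diff
--     for i in range(n):
--         if nums[i] != -1:
--             if prev_known_index is not None:
--                 diff = abs(nums[i] - nums[prev_known_index])
--                 max_adjacent_known_diff = max(max_adjacent_known_diff, diff)
--                 # Collect segments of -1s between known numbers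
--                 if i - prev_known_index > 1:
--                     segments.append((nums[prev_known_index], nums[i], i - prev_known_index - 1))
--             prev_known_index = i
--         else:
--             # Collect adjacent known values to -1s
--             if i > 0 and nums[i - 1] != -1:
--                 val = nums[i - 1]
--                 if min_adjacent is None:
--                     min_adjacent = val
--                     max_adjacent = val
--                 else:
--                     min_adjacent = min(min_adjacent, val)
--                     max_adjacent = max(max_adjacent, val)
--             if i + 1 < n and nums[i + 1] != -1:
--                 val = nums[i + 1]
--                 if min_adjacent is None:
--                     min_adjacent = val
--                     max_adjacent = val
--                 else:
--                     min_adjacent = min(min_adjacent, val)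
--                     max_adjacent = max(max_adjacent, val)
--
--     if min_adjacent is None:
--         # All elements are -1
--         return 0
--
--     # Step 2: Determine minimal possible maximum difference k for segments
--     segment_max_diff = 0
--     for a, b, m in segments:
--         k_candidate = ceil(abs(a - b) / (m + 1))
--         segment_max_diff = max(segment_max_diff, k_candidate)
--
--     # Combine max differences
--     k = max(max_adjacent_known_diff, segment_max_diff)
--
--     # Step 3: Calculate replacement value m
--     m = (min_adjacent + max_adjacent) // 2
--
--     # Step 4: Replace -1s with m and calculate actual maximum difference
--     nums_replaced = nums[:]
--     for i in range(n):
--         if nums_replaced[i] == -1: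
--             nums_replaced[i] = m
--
--     actual_max_diff = 0
--     for i in range(1, n):
--         diff = abs(nums_replaced[i] - nums_replaced[i - 1])
--         actual_max_diff = max(actual_max_diff, diff)
--
--     # The final result is the minimal possible maximum difference
--     result = max(k, actual_max_diff)
--     return result
-- ===== SOURCE B (Python) =====
-- def minimize_max_diff(nums):
--     # k never needs A's segment ceil-division pass: ceil(d/gap) <= d, so the max of
--     # consecutive known differences already dominates; and filling every -1 with the
--     # midpoint m makes the worst new adjacency exactly hi - m, so no filled copy of
--     # the array is needed either.
--     vals = [v for v in nums if v != -1]
--     edge = []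
--     for a, b in zip(nums, nums[1:]):
--         if a == -1 and b != -1:
--             edge.append(b)
--         elif b == -1 and a != -1:
--             edge.append(a)
--     if not edge:
--         return 0
--     lo, hi = min(edge), max(edge)
--     k = 0
--     for a, b in zip(vals, vals[1:]):
--         k = max(k, abs(b - a))
--     return max(k, hi - (lo + hi) // 2)
-- ===== Notes on version B (the rewrite author's own statement) =====
-- stated objective: simpler
-- what changed: B drops A's segment ceil-division pass and the filled-array copy entirely: the max of consecutive known differences provably dominates every ceil(d/gap), and the filled array's extra adjacencies collapse to the closed form hi - (lo+hi)//2 over the -1-adjacent boundary values, so B is just two short scans plus an arithmetic formula.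
import Mathlib
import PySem

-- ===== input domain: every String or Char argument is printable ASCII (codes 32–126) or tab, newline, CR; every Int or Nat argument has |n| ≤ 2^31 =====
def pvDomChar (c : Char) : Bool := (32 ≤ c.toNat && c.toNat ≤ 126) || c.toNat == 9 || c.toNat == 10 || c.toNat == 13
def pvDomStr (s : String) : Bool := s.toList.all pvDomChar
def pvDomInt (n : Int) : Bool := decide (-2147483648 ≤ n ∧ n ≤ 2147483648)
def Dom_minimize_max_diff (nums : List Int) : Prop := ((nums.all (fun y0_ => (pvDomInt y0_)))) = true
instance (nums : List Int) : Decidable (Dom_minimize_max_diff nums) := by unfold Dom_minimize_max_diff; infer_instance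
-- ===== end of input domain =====

-- B drops A's segment ceil-division pass and the filled-array copy: the max consecutive
-- known difference dominates every ceil(d/gap), and the filled array's extra adjacencies
-- collapse to the closed form hi - (lo+hi)//2 over the -1-adjacent boundary values;
-- objective: simpler (two short scans plus arithmetic), same O(n) cost.

-- ===== PORT A =====
-- A's loop state: (max_adjacent_known_diff, min_adjacent, max_adjacent, prev_known_index, segments)
structure StA where
  madk : Int
  mn : Option Int
  mx : Option Int
  prev : Option Nat
  segs : List (Int × Int × Nat)
deriving Repr, DecidableEq

-- the 'collect adjacent known value' update (Python's "if min_adjacent is None … else min/max")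
def addValA (s : StA) (v : Int) : StA :=
  match s.mn, s.mx with
  | some a, some b => { s with mn := some (min a v), mx := some (max b v) }
  | _, _ => { s with mn := some v, mx := some v }

-- one iteration of A's Step-1 loop at index i (all indexing in range; nums[i] ported as nums.getD i 0)
def stepA (nums : List Int) (n : Nat) (s : StA) (i : Nat) : StA :=
  if nums.getD i 0 ≠ -1 then
    match s.prev with
    | some p =>
      let diff := |nums.getD i 0 - nums.getD p 0|
      let segs' := if 1 < i - p then s.segs ++ [(nums.getD p 0, nums.getD i 0, i - p - 1)] else s.segs
      { s with madk := max s.madk diff, segs := segs', prev := some i }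
    | none => { s with prev := some i }
  else
    let s1 := if 0 < i ∧ nums.getD (i-1) 0 ≠ -1 then addValA s (nums.getD (i-1) 0) else s
    if i + 1 < n ∧ nums.getD (i+1) 0 ≠ -1 then addValA s1 (nums.getD (i+1) 0) else s1

-- math.ceil(abs(a-b)/(m+1)) ported as exact ceiling division -((-|a-b|) // (m+1)):
-- exact for the magnitudes admitted by Dom (|a-b| ≤ 2^32 ≪ 2^53, so the float division rounds to the same ceiling)
def ceilDivA (x d : Int) : Int := -(PySem.Int.floordiv (-x) d)

def minimize_max_diff (nums : List Int) : Int :=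
  let n := nums.length
  let s := (List.range n).foldl (stepA nums n) ⟨0, none, none, none, []⟩
  match s.mn, s.mx with
  | some mnA, some mxA =>
    let segMax := s.segs.foldl (fun acc t => max acc (ceilDivA |t.1 - t.2.1| ((t.2.2 : Int) + 1))) 0
    let k := max s.madk segMax
    let m := PySem.Int.floordiv (mnA + mxA) 2
    let numsR := nums.map (fun x => if x = -1 then m else x)
    let actual := (PySem.List.pyRange 1 (n : Int) 1).foldl
      (fun acc i => max acc |PySem.List.pyGetD numsR i 0 - PySem.List.pyGetD numsR (i-1) 0|) 0   -- range(1, n)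
    max k actual
  | _, _ => 0    -- min_adjacent is None: all elements are -1 or none touches one

-- ===== PORT B =====
def minimize_max_diff_alt (nums : List Int) : Int :=
  let vals := nums.filter (fun v => v ≠ -1)
  let edge := (nums.zip nums.tail).foldl (fun acc p =>
    if p.1 = -1 ∧ p.2 ≠ -1 then acc ++ [p.2]
    else if p.2 = -1 ∧ p.1 ≠ -1 then acc ++ [p.1] else acc) []
  match PySem.List.min? edge (fun x => x), PySem.List.max? edge (fun x => x) with
  | some lo, some hi =>
    let k := (vals.zip vals.tail).foldl (fun acc p => max acc |p.2 - p.1|) 0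
    max k (hi - PySem.Int.floordiv (lo + hi) 2)
  | _, _ => 0    -- 'if not edge: return 0' (min?/max? are none exactly on the empty list)

-- ===== PRECONDITION & SPEC =====
def Spec_minimize_max_diff (nums : List Int) (out : Int) : Prop := out = minimize_max_diff_alt nums
instance (nums : List Int) (out : Int) : Decidable (Spec_minimize_max_diff nums out) := by unfold Spec_minimize_max_diff; infer_instance

-- ===== CLAIM (what is proved, stated in full; the proofs are below) =====
def Claim_equal_minimize_max_diff : Prop := ∀ (nums : List Int), Dom_minimize_max_diff nums → Spec_minimize_max_diff nums (minimize_max_diff nums)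

-- ===== LEMMAS AND PROOFS =====

-- proof-only helpers ----------------------------------------------------------

-- known values among the first k entries
def valsK (nums : List Int) (k : Nat) : List Int := (nums.take k).filter (fun v => v ≠ -1)

-- max of |b-a| over consecutive pairs (exactly B's k-loop)
def consecMax (l : List Int) : Int := (l.zip l.tail).foldl (fun acc p => max acc |p.2 - p.1|) 0

-- running min / max of a list, none iff empty (Python's min/max of a list)
def omin : List Int → Option Int
  | [] => none
  | x :: t => some (t.foldl min x)
def omax : List Int → Option Int
  | [] => none
  | x :: t => some (t.foldl max x)

-- the values A's else-branch has collected after processing indices [0, k)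
def EkL (nums : List Int) : Nat → List Int
  | 0 => []
  | k+1 => EkL nums k ++ (if nums.getD k 0 = -1 then
      (if 0 < k ∧ nums.getD (k-1) 0 ≠ -1 then [nums.getD (k-1) 0] else []) ++
      (if k+1 < nums.length ∧ nums.getD (k+1) 0 ≠ -1 then [nums.getD (k+1) 0] else [])
    else [])

-- A's state after processing indices [0, k)
def FA (nums : List Int) (k : Nat) : StA :=
  (List.range k).foldl (stepA nums nums.length) ⟨0, none, none, none, []⟩

-- v is a known value standing next to a -1
def adjPat (nums : List Int) (v : Int) : Prop :=
  ∃ i : Nat, i + 1 < nums.length ∧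
    ((nums.getD i 0 = -1 ∧ nums.getD (i+1) 0 = v ∧ v ≠ -1) ∨
     (nums.getD (i+1) 0 = -1 ∧ nums.getD i 0 = v ∧ v ≠ -1))

structure InvP (nums : List Int) (k : Nat) (s : StA) : Prop where
  prev_none : s.prev = none → ∀ j, j < k → nums.getD j 0 = -1
  prev_some : ∀ p, s.prev = some p → p < k ∧ nums.getD p 0 ≠ -1 ∧
      ∀ j, p < j → j < k → nums.getD j 0 = -1
  prev_iff : s.prev = none ↔ valsK nums k = []
  prev_last : ∀ p, s.prev = some p → (valsK nums k).getLast? = some (nums.getD p 0)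
  madk_eq : s.madk = consecMax (valsK nums k)
  segs_le : ∀ t ∈ s.segs, |t.1 - t.2.1| ≤ s.madk
  adj_le : ∀ i, i + 1 < k → nums.getD i 0 ≠ -1 → nums.getD (i+1) 0 ≠ -1 →
      |nums.getD (i+1) 0 - nums.getD i 0| ≤ s.madk
  mn_eq : s.mn = omin (EkL nums k)
  mx_eq : s.mx = omax (EkL nums k)

-- basic facts ----------------------------------------------------------------

theorem consecMax_nonneg (l : List Int) : 0 ≤ consecMax l :=
  (PySem.List.le_foldl_max_int (l.zip l.tail) (fun p => |p.2 - p.1|) 0).1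

theorem foldl_max_le {α : Type} (f : α → Int) (B : Int) :
    ∀ (l : List α) (a : Int), a ≤ B → (∀ x ∈ l, f x ≤ B) →
      l.foldl (fun acc x => max acc (f x)) a ≤ B := by
  intro l
  induction l with
  | nil => intro a ha _; simpa using ha
  | cons x t ih =>
    intro a ha hb
    simp only [List.foldl_cons]
    exact ih _ (max_le ha (hb x (by simp))) (fun y hy => hb y (by simp [hy]))

theorem zip_tail_eq_map (nums : List Int) :
    nums.zip nums.tail =
      (List.range (nums.length - 1)).map (fun i => (nums.getD i 0, nums.getD (i+1) 0)) := by
  apply List.ext_getElem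
  · simp [List.length_zip, List.length_tail]
  · intro i h1 h2
    have hlen : nums.length - 1 = nums.tail.length := by simp [List.length_tail]
    have hi : i < nums.length - 1 := by simpa using h2
    have hi1 : i + 1 < nums.length := by omega
    simp [List.getElem_zip, List.getElem_tail, List.getD_eq_getElem?_getD,
      hi1, (by omega : i < nums.length)]

theorem zip_append_singleton (l : List Int) (v : Int) :
    (l ++ [v]).zip ((l ++ [v]).tail) =
      l.zip l.tail ++ (match l.getLast? with | none => [] | some w => [(w, v)]) := by
  induction l with
  | nil => rfl
  | cons x t ih =>
    cases t with
    | nil => rfl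
    | cons y u =>
      simp only [List.cons_append, List.tail_cons, List.zip_cons_cons,
        List.getLast?_cons_cons] at ih ⊢
      rw [ih]

theorem consecMax_append (l : List Int) (v : Int) :
    consecMax (l ++ [v]) =
      match l.getLast? with
      | none => 0
      | some w => max (consecMax l) |v - w| := by
  unfold consecMax
  rw [zip_append_singleton]
  cases h : l.getLast? with
  | none => simp_all [List.getLast?_eq_none_iff]
  | some w => simp [List.foldl_append]

theorem omin_append_singleton (l : List Int) (v : Int) :
    omin (l ++ [v]) = some (match omin l with | none => v | some a => min a v) := by
  cases l <;> simp [omin, List.foldl_append]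

theorem omax_append_singleton (l : List Int) (v : Int) :
    omax (l ++ [v]) = some (match omax l with | none => v | some a => max a v) := by
  cases l <;> simp [omax, List.foldl_append]

theorem omin_spec (l : List Int) (a : Int) (h : omin l = some a) :
    a ∈ l ∧ ∀ y ∈ l, a ≤ y := by
  cases l with
  | nil => simp [omin] at h
  | cons x t =>
    simp only [omin, Option.some.injEq] at h
    subst h
    constructor
    · rcases PySem.List.foldl_min_mem t x with h | h
      · simp [h]
      · simp [h]
    · intro y hy
      rcases List.mem_cons.mp hy with rfl | hy
      · exact (PySem.List.foldl_min_le t y).1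
      · exact (PySem.List.foldl_min_le t x).2 y hy

theorem omax_spec (l : List Int) (a : Int) (h : omax l = some a) :
    a ∈ l ∧ ∀ y ∈ l, y ≤ a := by
  cases l with
  | nil => simp [omax] at h
  | cons x t =>
    simp only [omax, Option.some.injEq] at h
    subst h
    constructor
    · rcases PySem.List.foldl_max_mem t x with h | h
      · simp [h]
      · simp [h]
    · intro y hy
      rcases List.mem_cons.mp hy with rfl | hy
      · exact (PySem.List.le_foldl_max t y).1
      · exact (PySem.List.le_foldl_max t x).2 y hy

theorem omin_eq_none_iff (l : List Int) : omin l = none ↔ l = [] := by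
  cases l <;> simp [omin]

theorem omax_eq_none_iff (l : List Int) : omax l = none ↔ l = [] := by
  cases l <;> simp [omax]

theorem omin_eq_min? (l : List Int) : PySem.List.min? l (fun x => x) = omin l := by
  cases l with
  | nil => rfl
  | cons x t => simp [omin, PySem.List.min?_id_cons]

theorem omax_eq_max? (l : List Int) : PySem.List.max? l (fun x => x) = omax l := by
  cases l with
  | nil => rfl
  | cons x t => simp [omax, PySem.List.max?_id_cons]

theorem omin_congr_mem (l₁ l₂ : List Int) (h : ∀ v, v ∈ l₁ ↔ v ∈ l₂) :
    omin l₁ = omin l₂ := by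
  cases h1 : omin l₁ with
  | none =>
    rw [omin_eq_none_iff] at h1
    subst h1
    rw [eq_comm, omin_eq_none_iff]
    cases l₂ with
    | nil => rfl
    | cons x t => exact absurd ((h x).mpr (by simp)) (by simp)
  | some a =>
    cases h2 : omin l₂ with
    | none =>
      rw [omin_eq_none_iff] at h2
      subst h2
      obtain ⟨hm, -⟩ := omin_spec l₁ a h1
      exact absurd ((h a).mp hm) (by simp)
    | some b =>
      obtain ⟨hm1, hle1⟩ := omin_spec l₁ a h1
      obtain ⟨hm2, hle2⟩ := omin_spec l₂ b h2
      have := le_antisymm (hle1 b ((h b).mpr hm2)) (hle2 a ((h a).mp hm1))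
      simp [this]

theorem omax_congr_mem (l₁ l₂ : List Int) (h : ∀ v, v ∈ l₁ ↔ v ∈ l₂) :
    omax l₁ = omax l₂ := by
  cases h1 : omax l₁ with
  | none =>
    rw [omax_eq_none_iff] at h1
    subst h1
    rw [eq_comm, omax_eq_none_iff]
    cases l₂ with
    | nil => rfl
    | cons x t => exact absurd ((h x).mpr (by simp)) (by simp)
  | some a =>
    cases h2 : omax l₂ with
    | none =>
      rw [omax_eq_none_iff] at h2
      subst h2
      obtain ⟨hm, -⟩ := omax_spec l₁ a h1
      exact absurd ((h a).mp hm) (by simp)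
    | some b =>
      obtain ⟨hm1, hle1⟩ := omax_spec l₁ a h1
      obtain ⟨hm2, hle2⟩ := omax_spec l₂ b h2
      have := le_antisymm (hle1 b ((h b).mpr hm2)) (hle2 a ((h a).mp hm1))
      simp [this]

-- membership characterisations ------------------------------------------------

theorem mem_EkL_mono (nums : List Int) (v : Int) {k k' : Nat} (h : k ≤ k')
    (hv : v ∈ EkL nums k) : v ∈ EkL nums k' := by
  induction h with
  | refl => exact hv
  | step h ih => exact List.mem_append_left _ ih

theorem adjPat_of_mem_EkL (nums : List Int) (v : Int) :
    ∀ k, k ≤ nums.length → v ∈ EkL nums k → adjPat nums v := by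
  intro k
  induction k with
  | zero => intro _ h; simp [EkL] at h
  | succ k ih =>
    intro hk hv
    simp only [EkL] at hv
    rcases List.mem_append.mp hv with h | h
    · exact ih (by omega) h
    · by_cases hm1 : nums.getD k 0 = -1
      · rw [if_pos hm1] at h
        rcases List.mem_append.mp h with h | h
        · by_cases hc : 0 < k ∧ nums.getD (k-1) 0 ≠ -1
          · rw [if_pos hc] at h
            simp only [List.mem_singleton] at h
            subst h
            exact ⟨k - 1, by omega, Or.inr
              ⟨by simpa [Nat.sub_add_cancel hc.1] using hm1, rfl, hc.2⟩⟩
          · rw [if_neg hc] at h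
            simp at h
        · by_cases hc : k + 1 < nums.length ∧ nums.getD (k+1) 0 ≠ -1
          · rw [if_pos hc] at h
            simp only [List.mem_singleton] at h
            subst h
            exact ⟨k, hc.1, Or.inl ⟨hm1, rfl, hc.2⟩⟩
          · rw [if_neg hc] at h
            simp at h
      · rw [if_neg hm1] at h
        simp at h

theorem mem_EkL_of_adjPat (nums : List Int) (v : Int) (h : adjPat nums v) :
    v ∈ EkL nums nums.length := by
  obtain ⟨i, hi, hpat⟩ := h
  rcases hpat with ⟨h1, h2, h3⟩ | ⟨h1, h2, h3⟩
  · refine mem_EkL_mono nums v (k := i + 1) (by omega) ?_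
    simp only [EkL]
    refine List.mem_append_right _ ?_
    rw [if_pos h1]
    refine List.mem_append_right _ ?_
    rw [if_pos ⟨hi, by rw [h2]; exact h3⟩]
    simp only [List.mem_singleton]
    exact h2.symm
  · refine mem_EkL_mono nums v (k := i + 2) (by omega) ?_
    simp only [EkL]
    refine List.mem_append_right _ ?_
    rw [if_pos h1]
    refine List.mem_append_left _ ?_
    have hc : 0 < i + 1 ∧ nums.getD (i+1-1) 0 ≠ -1 :=
      ⟨by omega, by simp only [Nat.add_sub_cancel]; rw [h2]; exact h3⟩
    rw [if_pos hc]
    simp only [Nat.add_sub_cancel, List.mem_singleton]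
    exact h2.symm

theorem mem_EkL_iff (nums : List Int) (v : Int) :
    v ∈ EkL nums nums.length ↔ adjPat nums v :=
  ⟨adjPat_of_mem_EkL nums v nums.length le_rfl, mem_EkL_of_adjPat nums v⟩

theorem mem_Bedge_iff (nums : List Int) (v : Int) :
    v ∈ (nums.zip nums.tail).foldl (fun acc p =>
      if p.1 = -1 ∧ p.2 ≠ -1 then acc ++ [p.2]
      else if p.2 = -1 ∧ p.1 ≠ -1 then acc ++ [p.1] else acc) [] ↔ adjPat nums v := by
  have hbody : (nums.zip nums.tail).foldl (fun acc p =>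
      if p.1 = -1 ∧ p.2 ≠ -1 then acc ++ [p.2]
      else if p.2 = -1 ∧ p.1 ≠ -1 then acc ++ [p.1] else acc) [] =
      (nums.zip nums.tail).flatMap (fun p =>
        if p.1 = -1 ∧ p.2 ≠ -1 then [p.2]
        else if p.2 = -1 ∧ p.1 ≠ -1 then [p.1] else []) := by
    trans ((nums.zip nums.tail).foldl (fun acc p => acc ++
        (if p.1 = -1 ∧ p.2 ≠ -1 then [p.2]
         else if p.2 = -1 ∧ p.1 ≠ -1 then [p.1] else [])) [])
    · apply PySem.List.foldl_congr_mem
      intro acc x _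
      split_ifs <;> simp
    · rw [PySem.List.foldl_append_eq_flatMap]
      simp
  rw [hbody, zip_tail_eq_map]
  simp only [List.mem_flatMap, List.mem_map, List.mem_range]
  constructor
  · rintro ⟨p, ⟨i, hi, rfl⟩, hv⟩
    split_ifs at hv with c1 c2
    · simp only [List.mem_singleton] at hv
      exact ⟨i, by omega, Or.inl ⟨c1.1, hv.symm, hv ▸ c1.2⟩⟩
    · simp only [List.mem_singleton] at hv
      exact ⟨i, by omega, Or.inr ⟨c2.1, hv.symm, hv ▸ c2.2⟩⟩
    · simp at hv
  · rintro ⟨i, hi, hpat⟩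
    refine ⟨(nums.getD i 0, nums.getD (i+1) 0), ⟨i, by omega, rfl⟩, ?_⟩
    rcases hpat with ⟨h1, h2, h3⟩ | ⟨h1, h2, h3⟩
    · rw [if_pos ⟨h1, by rw [h2]; exact h3⟩]
      simp only [List.mem_singleton]
      exact h2.symm
    · rw [if_neg (by rw [h1]; simp), if_pos ⟨h1, by rw [h2]; exact h3⟩]
      simp only [List.mem_singleton]
      exact h2.symm
  

-- the main invariant -----------------------------------------------------------

theorem FA_succ (nums : List Int) (k : Nat) :
    FA nums (k+1) = stepA nums nums.length (FA nums k) k := by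
  unfold FA
  rw [List.range_succ, List.foldl_append]
  rfl

theorem valsK_succ (nums : List Int) (k : Nat) (h : k < nums.length) :
    valsK nums (k+1) = valsK nums k ++
      (if nums.getD k 0 ≠ -1 then [nums.getD k 0] else []) := by
  unfold valsK
  rw [List.take_add_one, List.filter_append]
  congr 1
  rw [List.getElem?_eq_getElem h, List.getD_eq_getElem _ _ h]
  by_cases hv : nums[k] ≠ -1
  · rw [if_pos hv]
    simp [List.filter, hv]
  · rw [if_neg hv]
    simp at hv
    simp [List.filter, hv]

theorem addValA_prev (s : StA) (v : Int) : (addValA s v).prev = s.prev := by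
  rcases s with ⟨madk, mn, mx, prev, segs⟩
  cases mn <;> cases mx <;> rfl

theorem addValA_madk (s : StA) (v : Int) : (addValA s v).madk = s.madk := by
  rcases s with ⟨madk, mn, mx, prev, segs⟩
  cases mn <;> cases mx <;> rfl

theorem addValA_segs (s : StA) (v : Int) : (addValA s v).segs = s.segs := by
  rcases s with ⟨madk, mn, mx, prev, segs⟩
  cases mn <;> cases mx <;> rfl

theorem addValA_minmax (s : StA) (v : Int) (L : List Int)
    (h1 : s.mn = omin L) (h2 : s.mx = omax L) :
    (addValA s v).mn = omin (L ++ [v]) ∧ (addValA s v).mx = omax (L ++ [v]) := by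
  rcases s with ⟨madk, mn, mx, prev, segs⟩
  cases L with
  | nil =>
    simp only [omin, omax] at h1 h2
    subst h1; subst h2
    simp [addValA, omin, omax]
  | cons x t =>
    simp only [omin, omax] at h1 h2
    subst h1; subst h2
    rw [omin_append_singleton, omax_append_singleton]
    simp [addValA, omin, omax]

theorem inv_else (nums : List Int) (k : Nat) (s s2 : StA)
    (hm1 : nums.getD k 0 = -1) (hinv : InvP nums k s)
    (L1 L2 : List Int)
    (hE : EkL nums (k+1) = (EkL nums k ++ L1) ++ L2)
    (hV : valsK nums (k+1) = valsK nums k)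
    (hprev2 : s2.prev = s.prev) (hmadk2 : s2.madk = s.madk) (hsegs2 : s2.segs = s.segs)
    (hmn2 : s2.mn = omin ((EkL nums k ++ L1) ++ L2))
    (hmx2 : s2.mx = omax ((EkL nums k ++ L1) ++ L2)) :
    InvP nums (k+1) s2 := by
  refine ⟨?_, ?_, ?_, ?_, ?_, ?_, ?_, ?_, ?_⟩
  · intro h j hj
    rw [hprev2] at h
    by_cases hjk : j < k
    · exact hinv.prev_none h j hjk
    · have : j = k := by omega
      subst this
      exact hm1
  · intro p hp
    rw [hprev2] at hp
    obtain ⟨h1, h2, h3⟩ := hinv.prev_some p hp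
    refine ⟨by omega, h2, ?_⟩
    intro j hj1 hj2
    by_cases hjk : j < k
    · exact h3 j hj1 hjk
    · have : j = k := by omega
      subst this
      exact hm1
  · rw [hprev2, hV]
    exact hinv.prev_iff
  · intro p hp
    rw [hprev2] at hp
    rw [hV]
    exact hinv.prev_last p hp
  · rw [hmadk2, hV]
    exact hinv.madk_eq
  · intro t ht
    rw [hsegs2] at ht
    rw [hmadk2]
    exact hinv.segs_le t ht
  · intro i hik hi1 hi2
    rw [hmadk2]
    by_cases hik' : i + 1 < k
    · exact hinv.adj_le i hik' hi1 hi2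
    · have : i + 1 = k := by omega
      rw [this] at hi2
      exact absurd hm1 hi2
  · rw [hmn2, hE]
  · rw [hmx2, hE]

theorem inv_holds (nums : List Int) : ∀ k, k ≤ nums.length → InvP nums k (FA nums k) := by
  intro k
  induction k with
  | zero =>
    intro _
    refine ⟨?_, ?_, ?_, ?_, ?_, ?_, ?_, ?_, ?_⟩
    · intro _ j hj; omega
    · intro p hp; simp [FA] at hp
    · simp [FA, valsK]
    · intro p hp; simp [FA] at hp
    · simp [FA, consecMax, valsK]
    · intro t ht; simp [FA] at ht
    · intro i h; omega
    · simp [FA, EkL, omin]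
    · simp [FA, EkL, omax]
  | succ k ih =>
    intro hk1
    have hklt : k < nums.length := by omega
    have hinv := ih (by omega)
    rw [FA_succ]
    by_cases hknown : nums.getD k 0 ≠ -1
    · -- Python's "nums[i] != -1" branch
      have hE : EkL nums (k+1) = EkL nums k := by
        simp only [EkL]
        rw [if_neg (by simpa using hknown)]
        simp
      have hV : valsK nums (k+1) = valsK nums k ++ [nums.getD k 0] := by
        rw [valsK_succ nums k hklt, if_pos hknown]
      cases hprev : (FA nums k).prev with
      | some p =>
        obtain ⟨hpk, hpknown, hgap⟩ := hinv.prev_some p hprev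
        have hlast := hinv.prev_last p hprev
        simp only [stepA, if_pos hknown, hprev]
        refine ⟨?_, ?_, ?_, ?_, ?_, ?_, ?_, ?_, ?_⟩
        · intro h; simp at h
        · intro q hq
          simp only [Option.some.injEq] at hq
          subst hq
          exact ⟨by omega, hknown, by intro j h1 h2; omega⟩
        · simp [hV]
        · intro q hq
          simp only [Option.some.injEq] at hq
          subst hq
          simp [hV]
        · simp only [hV, consecMax_append, hlast]
          rw [hinv.madk_eq]
        · intro t ht
          simp only at ht
          have hmle : (FA nums k).madk ≤ max (FA nums k).madk
              |nums.getD k 0 - nums.getD p 0| := le_max_left _ _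
          by_cases hgap1 : 1 < k - p
          · rw [if_pos hgap1] at ht
            rcases List.mem_append.mp ht with h | h
            · exact le_trans (hinv.segs_le t h) hmle
            · simp only [List.mem_singleton] at h
              subst h
              simp only
              rw [abs_sub_comm]
              exact le_max_right _ _
          · rw [if_neg hgap1] at ht
            exact le_trans (hinv.segs_le t ht) hmle
        · intro i hik hi1 hi2
          simp only
          by_cases hik' : i + 1 < k
          · exact le_trans (hinv.adj_le i hik' hi1 hi2) (le_max_left _ _)
          · have hieq : i + 1 = k := by omega
            have hpi : p = i := by
              rcases Nat.lt_or_ge p i with h | h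
              · exact absurd (hgap i h (by omega)) hi1
              · omega
            subst hpi
            rw [hieq]
            exact le_max_right _ _
        · rw [hE]; exact hinv.mn_eq
        · rw [hE]; exact hinv.mx_eq
      | none =>
        have hnoknown := hinv.prev_none hprev
        simp only [stepA, if_pos hknown, hprev]
        refine ⟨?_, ?_, ?_, ?_, ?_, ?_, ?_, ?_, ?_⟩
        · intro h; simp at h
        · intro q hq
          simp only [Option.some.injEq] at hq
          subst hq
          exact ⟨by omega, hknown, by intro j h1 h2; omega⟩
        · simp [hV]
        · intro q hq
          simp only [Option.some.injEq] at hq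
          subst hq
          have : valsK nums k = [] := hinv.prev_iff.mp hprev
          simp [hV, this]
        · have hvk : valsK nums k = [] := hinv.prev_iff.mp hprev
          simp only [hV, hvk, List.nil_append]
          rw [hinv.madk_eq, hvk]
          rfl
        · intro t ht
          exact hinv.segs_le t ht
        · intro i hik hi1 hi2
          by_cases hik' : i + 1 < k
          · exact hinv.adj_le i hik' hi1 hi2
          · exact absurd (hnoknown i (by omega)) hi1
        · rw [hE]; exact hinv.mn_eq
        · rw [hE]; exact hinv.mx_eq
    · -- Python's else branch: nums[i] == -1
      have hm1 : nums.getD k 0 = -1 := by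
        by_contra h
        exact hknown h
      have hV : valsK nums (k+1) = valsK nums k := by
        rw [valsK_succ nums k hklt, if_neg hknown]
        simp
      have hE : EkL nums (k+1) = (EkL nums k ++
          (if 0 < k ∧ nums.getD (k-1) 0 ≠ -1 then [nums.getD (k-1) 0] else [])) ++
          (if k+1 < nums.length ∧ nums.getD (k+1) 0 ≠ -1 then [nums.getD (k+1) 0] else []) := by
        simp only [EkL]
        rw [if_pos hm1, List.append_assoc]
      simp only [stepA, if_neg hknown]
      by_cases hc1 : 0 < k ∧ nums.getD (k-1) 0 ≠ -1 <;>
        by_cases hc2 : k + 1 < nums.length ∧ nums.getD (k+1) 0 ≠ -1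
      · rw [if_pos hc1, if_pos hc2] at hE ⊢
        obtain ⟨ha1, ha2⟩ := addValA_minmax (FA nums k) (nums.getD (k-1) 0) (EkL nums k)
          hinv.mn_eq hinv.mx_eq
        obtain ⟨hb1, hb2⟩ := addValA_minmax _ (nums.getD (k+1) 0) _ ha1 ha2
        exact inv_else nums k (FA nums k) _ hm1 hinv _ _ hE hV
          (by rw [addValA_prev, addValA_prev]) (by rw [addValA_madk, addValA_madk])
          (by rw [addValA_segs, addValA_segs]) hb1 hb2
      · rw [if_pos hc1, if_neg hc2] at hE ⊢
        obtain ⟨ha1, ha2⟩ := addValA_minmax (FA nums k) (nums.getD (k-1) 0) (EkL nums k)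
          hinv.mn_eq hinv.mx_eq
        exact inv_else nums k (FA nums k) _ hm1 hinv _ _ hE hV
          (by rw [addValA_prev]) (by rw [addValA_madk]) (by rw [addValA_segs])
          (by rw [List.append_nil]; exact ha1) (by rw [List.append_nil]; exact ha2)
      · rw [if_neg hc1, if_pos hc2] at hE ⊢
        obtain ⟨hb1, hb2⟩ := addValA_minmax (FA nums k) (nums.getD (k+1) 0) (EkL nums k)
          hinv.mn_eq hinv.mx_eq
        exact inv_else nums k (FA nums k) _ hm1 hinv _ _ hE hV
          (by rw [addValA_prev]) (by rw [addValA_madk]) (by rw [addValA_segs])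
          (by rw [List.append_nil]; exact hb1) (by rw [List.append_nil]; exact hb2)
      · rw [if_neg hc1, if_neg hc2] at hE ⊢
        exact inv_else nums k (FA nums k) _ hm1 hinv _ _ hE hV rfl rfl rfl
          (by rw [List.append_nil, List.append_nil]; exact hinv.mn_eq)
          (by rw [List.append_nil, List.append_nil]; exact hinv.mx_eq)
  

-- assembly ---------------------------------------------------------------------

theorem ceilDivA_le (x d : Int) (hx : 0 ≤ x) (hd : 0 < d) : ceilDivA x d ≤ x := by
  unfold ceilDivA
  rw [PySem.Int.floordiv_eq_ediv_of_pos hd]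
  have h1 : -x ≤ (-x) / d := by
    rw [Int.le_ediv_iff_mul_le hd]
    nlinarith
  omega

theorem main_eq (nums : List Int) : minimize_max_diff nums = minimize_max_diff_alt nums := by
  have hinv := inv_holds nums nums.length le_rfl
  have hmemeq : ∀ v : Int, v ∈ ((nums.zip nums.tail).foldl (fun acc p =>
      if p.1 = -1 ∧ p.2 ≠ -1 then acc ++ [p.2]
      else if p.2 = -1 ∧ p.1 ≠ -1 then acc ++ [p.1] else acc) []) ↔
      v ∈ EkL nums nums.length :=
    fun v => (mem_Bedge_iff nums v).trans (mem_EkL_iff nums v).symm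
  have hminB : PySem.List.min? ((nums.zip nums.tail).foldl (fun acc p =>
      if p.1 = -1 ∧ p.2 ≠ -1 then acc ++ [p.2]
      else if p.2 = -1 ∧ p.1 ≠ -1 then acc ++ [p.1] else acc) []) (fun x => x) =
      (FA nums nums.length).mn := by
    rw [omin_eq_min?, omin_congr_mem _ _ hmemeq]
    exact hinv.mn_eq.symm
  have hmaxB : PySem.List.max? ((nums.zip nums.tail).foldl (fun acc p =>
      if p.1 = -1 ∧ p.2 ≠ -1 then acc ++ [p.2]
      else if p.2 = -1 ∧ p.1 ≠ -1 then acc ++ [p.1] else acc) []) (fun x => x) =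
      (FA nums nums.length).mx := by
    rw [omax_eq_max?, omax_congr_mem _ _ hmemeq]
    exact hinv.mx_eq.symm
  have hkB : ((nums.filter (fun v => v ≠ -1)).zip (nums.filter (fun v => v ≠ -1)).tail).foldl
      (fun acc p => max acc |p.2 - p.1|) 0 = (FA nums nums.length).madk := by
    rw [hinv.madk_eq]
    unfold consecMax valsK
    rw [List.take_length]
  show (match (FA nums nums.length).mn, (FA nums nums.length).mx with
    | some mnA, some mxA =>
      let segMax := (FA nums nums.length).segs.foldl
        (fun (acc : Int) (t : Int × Int × Nat) => max acc (ceilDivA |t.1 - t.2.1| ((t.2.2 : Int) + 1))) 0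
      let k := max (FA nums nums.length).madk segMax
      let m := PySem.Int.floordiv (mnA + mxA) 2
      let numsR := nums.map (fun x => if x = -1 then m else x)
      let actual := (PySem.List.pyRange 1 (nums.length : Int) 1).foldl
        (fun acc i => max acc |PySem.List.pyGetD numsR i 0 - PySem.List.pyGetD numsR (i-1) 0|) 0
      max k actual
    | _, _ => 0) =
    (match PySem.List.min? ((nums.zip nums.tail).foldl (fun acc p =>
        if p.1 = -1 ∧ p.2 ≠ -1 then acc ++ [p.2]
        else if p.2 = -1 ∧ p.1 ≠ -1 then acc ++ [p.1] else acc) []) (fun x => x),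
      PySem.List.max? ((nums.zip nums.tail).foldl (fun acc p =>
        if p.1 = -1 ∧ p.2 ≠ -1 then acc ++ [p.2]
        else if p.2 = -1 ∧ p.1 ≠ -1 then acc ++ [p.1] else acc) []) (fun x => x) with
    | some lo, some hi =>
      max (((nums.filter (fun v => v ≠ -1)).zip (nums.filter (fun v => v ≠ -1)).tail).foldl
        (fun (acc : Int) (p : Int × Int) => max acc |p.2 - p.1|) 0) (hi - PySem.Int.floordiv (lo + hi) 2)
    | _, _ => 0)
  rw [hminB, hmaxB]
  cases hmn : (FA nums nums.length).mn with
  | none => cases (FA nums nums.length).mx <;> rfl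
  | some lo =>
  cases hmx : (FA nums nums.length).mx with
  | none => rfl
  | some hi =>
  simp only
  rw [hkB]
  -- names
  set madk := (FA nums nums.length).madk with hmadk
  set m := PySem.Int.floordiv (lo + hi) 2 with hmdef
  -- basic bounds
  have hlo := omin_spec _ _ (hinv.mn_eq ▸ hmn)
  have hhi := omax_spec _ _ (hinv.mx_eq ▸ hmx)
  have hlohi : lo ≤ hi := hhi.2 lo hlo.1
  have hm2 : 2 * m ≤ lo + hi ∧ lo + hi < 2 * m + 2 := by
    rw [hmdef, PySem.Int.floordiv_eq_ediv_of_pos (by norm_num)]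
    omega
  have hmhi : 0 ≤ hi - m := by omega
  have hmadk0 : 0 ≤ madk := by rw [hmadk, hinv.madk_eq]; exact consecMax_nonneg _
  -- segments are dominated by madk
  have hseg : (FA nums nums.length).segs.foldl
      (fun acc t => max acc (ceilDivA |t.1 - t.2.1| ((t.2.2 : Int) + 1))) 0 ≤ madk := by
    refine foldl_max_le _ _ _ _ hmadk0 ?_
    intro t ht
    exact le_trans (ceilDivA_le _ _ (abs_nonneg _) (by omega)) (hinv.segs_le t ht)
  rw [max_eq_left hseg]
  -- the filled-array scan
  set numsR := nums.map (fun x => if x = -1 then m else x) with hRdef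
  have hRget : ∀ j, j < nums.length →
      numsR.getD j 0 = (if nums.getD j 0 = -1 then m else nums.getD j 0) := by
    intro j hj
    rw [hRdef, List.getD_eq_getElem _ _ (by simpa using hj), List.getElem_map,
      List.getD_eq_getElem _ _ hj]
  have hrange : PySem.List.pyRange 1 (nums.length : Int) 1 =
      (List.range (nums.length - 1)).map (fun j => ((j + 1 : Nat) : Int)) := by
    rw [PySem.List.pyRange_one]
    have ht : ((nums.length : Int) - 1).toNat = nums.length - 1 := by omega
    rw [ht]
    apply List.map_congr_left
    intro j _
    push_cast
    ring
  have hactual : (PySem.List.pyRange 1 (nums.length : Int) 1).foldl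
      (fun acc i => max acc |PySem.List.pyGetD numsR i 0 - PySem.List.pyGetD numsR (i-1) 0|) 0 =
      (List.range (nums.length - 1)).foldl (fun acc j => max acc
        |(if nums.getD (j+1) 0 = -1 then m else nums.getD (j+1) 0) -
         (if nums.getD j 0 = -1 then m else nums.getD j 0)|) 0 := by
    rw [hrange, List.foldl_map]
    apply PySem.List.foldl_congr_mem
    intro acc j hj
    have hj' : j < nums.length - 1 := List.mem_range.mp hj
    have e2 : ((j + 1 : Nat) : Int) - 1 = ((j : Nat) : Int) := by push_cast; ring
    rw [e2, PySem.List.pyGetD_natCast, PySem.List.pyGetD_natCast,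
      hRget (j+1) (by omega), hRget j (by omega)]
  rw [hactual]
  -- bound every scanned adjacency
  have hub : ∀ j ∈ List.range (nums.length - 1),
      |(if nums.getD (j+1) 0 = -1 then m else nums.getD (j+1) 0) -
       (if nums.getD j 0 = -1 then m else nums.getD j 0)| ≤ max madk (hi - m) := by
    intro j hj
    have hj' : j + 1 < nums.length := by
      have := List.mem_range.mp hj
      omega
    by_cases h1 : nums.getD j 0 = -1 <;> by_cases h2 : nums.getD (j+1) 0 = -1
    · rw [if_pos h1, if_pos h2]
      simpa using le_max_of_le_right hmhi
    · rw [if_pos h1, if_neg h2]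
      have hv : nums.getD (j+1) 0 ∈ EkL nums nums.length :=
        mem_EkL_of_adjPat nums _ ⟨j, hj', Or.inl ⟨h1, rfl, h2⟩⟩
      have := hlo.2 _ hv
      have := hhi.2 _ hv
      refine le_max_of_le_right ?_
      rw [abs_le]
      omega
    · rw [if_neg h1, if_pos h2]
      have hv : nums.getD j 0 ∈ EkL nums nums.length :=
        mem_EkL_of_adjPat nums _ ⟨j, hj', Or.inr ⟨h2, rfl, h1⟩⟩
      have := hlo.2 _ hv
      have := hhi.2 _ hv
      refine le_max_of_le_right ?_
      rw [abs_le]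
      omega
    · rw [if_neg h1, if_neg h2]
      exact le_max_of_le_left (hinv.adj_le j hj' h1 h2)
  have hup : (List.range (nums.length - 1)).foldl (fun acc j => max acc
        |(if nums.getD (j+1) 0 = -1 then m else nums.getD (j+1) 0) -
         (if nums.getD j 0 = -1 then m else nums.getD j 0)|) 0 ≤ max madk (hi - m) :=
    foldl_max_le _ _ _ _ (le_max_of_le_left hmadk0) hub
  -- the boundary value hi is actually scanned
  have hdown : hi - m ≤ (List.range (nums.length - 1)).foldl (fun acc j => max acc
        |(if nums.getD (j+1) 0 = -1 then m else nums.getD (j+1) 0) -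
         (if nums.getD j 0 = -1 then m else nums.getD j 0)|) 0 := by
    obtain ⟨i, hi1, hpat⟩ := adjPat_of_mem_EkL nums hi nums.length le_rfl hhi.1
    have hmem : i ∈ List.range (nums.length - 1) := List.mem_range.mpr (by omega)
    have hterm := (PySem.List.le_foldl_max_int (List.range (nums.length - 1))
      (fun j => |(if nums.getD (j+1) 0 = -1 then m else nums.getD (j+1) 0) -
         (if nums.getD j 0 = -1 then m else nums.getD j 0)|) 0).2 i hmem
    refine le_trans ?_ hterm
    rcases hpat with ⟨h1, h2, h3⟩ | ⟨h1, h2, h3⟩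
    · rw [if_pos h1, h2, if_neg h3]
      rw [abs_of_nonneg hmhi]
    · rw [if_pos h1, h2, if_neg h3]
      rw [abs_sub_comm, abs_of_nonneg hmhi]
  -- conclude
  apply le_antisymm
  · exact max_le (le_max_left _ _) hup
  · exact max_le (le_max_left _ _) (le_trans hdown (le_max_right _ _))

-- ===== VERDICT (by name: the statement is the Claim_ definition above) =====
theorem minimize_max_diff_spec : Claim_equal_minimize_max_diff := by
  intro nums _
  unfold Spec_minimize_max_diff
  exact main_eq nums
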